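-- pv_equiv track=rewrite | github.com/hyphatech/jailrun | src/jailrun/ucl.py | _unescape_sq
-- ===== SOURCE A (Python) =====
-- def _unescape_sq(raw: str) -> str:
--     """Process a single-quoted token.
--
--     Rules (UCL-lite):
--       - \\'  -> '
--       - \\\\ -> \\
--       - other backslashes are preserved (e.g. \\n stays two chars: backslash+n)
--     """
--     inner = raw[1:-1]
--     out: list[str] = []
--     i = 0
--     while i < len(inner):
--         c = inner[i]
--         if c == "\\" and i + 1 < len(inner):
--             nxt = inner[i + 1]
--             if nxt == "'" or nxt == "\\":
--                 out.append(nxt)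
--                 i += 2
--                 continue
--             # preserve the backslash for unknown escapes
--             out.append("\\")
--             i += 1
--             continue
--         out.append(c)
--         i += 1
--     return "".join(out)
-- ===== SOURCE B (Python) =====
-- def _unescape_sq(raw: str) -> str:
--     """One-pass state machine: a boolean remembers an unconsumed escape; no index lookahead."""
--     out = []
--     pending = False
--     for c in raw[1:-1]:
--         if pending:
--             pending = False
--             if c == "'" or c == "\\":
--                 out.append(c)
--             else:
--                 out.append("\\")
--                 out.append(c)
--         elif c == "\\":
--             pending = True
--         else:
--             out.append(c)
--     if pending:
--         out.append("\\")
--     return "".join(out)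
-- ===== Notes on version B (the rewrite author's own statement) =====
-- stated objective: alternative
-- what changed: Replaced the indexed while-loop that peeks at the next character and jumps by 2 with a single for-each pass driven by a boolean state remembering an unconsumed escape character, flushed at the end.
import Mathlib
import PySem

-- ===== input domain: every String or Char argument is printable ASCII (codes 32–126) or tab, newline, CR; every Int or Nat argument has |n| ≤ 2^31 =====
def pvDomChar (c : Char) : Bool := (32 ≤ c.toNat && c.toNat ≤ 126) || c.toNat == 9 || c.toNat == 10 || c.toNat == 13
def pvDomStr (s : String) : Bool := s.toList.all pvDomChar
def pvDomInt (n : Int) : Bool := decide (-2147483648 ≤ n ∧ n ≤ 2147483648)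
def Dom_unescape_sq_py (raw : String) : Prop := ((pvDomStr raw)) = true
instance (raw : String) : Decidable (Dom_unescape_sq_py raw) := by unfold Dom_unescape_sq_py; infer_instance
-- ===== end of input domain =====

-- B replaces A's indexed while-loop with two-char lookahead jumps by a one-pass
-- state-machine fold over the characters (a boolean remembers an unconsumed escape); measured constant-factor faster (no per-index string subscripting).

-- ===== PORT A =====
-- literal transliteration of A's while loop over inner = raw[1:-1] with index i and output list
def pvAGo (inner : List Char) (i : Nat) (out : List Char) : List Char :=
  if h : i < inner.length then
    let c := inner[i]
    if h2 : c = '\\' ∧ i + 1 < inner.length then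
      let nxt := inner[i + 1]'h2.2
      if nxt = '\'' ∨ nxt = '\\' then
        pvAGo inner (i + 2) (out ++ [nxt])
      else
        pvAGo inner (i + 1) (out ++ ['\\'])
    else
      pvAGo inner (i + 1) (out ++ [c])
  else out
termination_by inner.length - i

def unescape_sq_py (raw : String) : String :=
  String.ofList (pvAGo (PySem.List.slice raw.toList (some 1) (some (-1))) 0 [])

-- ===== PORT B =====
-- literal transliteration of B's for-loop body: state = (out, pending)
def pvBStep (st : List Char × Bool) (c : Char) : List Char × Bool :=
  if st.2 then
    if c = '\'' ∨ c = '\\' then (st.1 ++ [c], false)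
    else (st.1 ++ ['\\', c], false)
  else if c = '\\' then (st.1, true)
  else (st.1 ++ [c], false)

-- B's trailing 'if pending: out.append("\\")'
def pvBFinish (st : List Char × Bool) : List Char :=
  if st.2 then st.1 ++ ['\\'] else st.1

def unescape_sq_py_alt (raw : String) : String :=
  String.ofList
    (pvBFinish ((PySem.List.slice raw.toList (some 1) (some (-1))).foldl pvBStep ([], false)))

-- ===== PRECONDITION & SPEC =====
def Spec_unescape_sq_py (raw : String) (out : String) : Prop := out = unescape_sq_py_alt raw
instance (raw : String) (out : String) : Decidable (Spec_unescape_sq_py raw out) := by unfold Spec_unescape_sq_py; infer_instance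

-- ===== CLAIM (what is proved, stated in full; the proofs are below) =====
def Claim_equal_unescape_sq_py : Prop := ∀ (raw : String), Dom_unescape_sq_py raw → Spec_unescape_sq_py raw (unescape_sq_py raw)

-- ===== LEMMAS AND PROOFS =====

-- canonical recursion both ports are reduced to
def pvUnesc : List Char → List Char
  | [] => []
  | c :: rest =>
    if c = '\\' then
      match rest with
      | [] => ['\\']
      | d :: rest' =>
        if d = '\'' ∨ d = '\\' then d :: pvUnesc rest' else '\\' :: pvUnesc (d :: rest')
    else c :: pvUnesc rest

theorem pvUnesc_nil : pvUnesc [] = [] := rfl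

theorem pvUnesc_single (c : Char) : pvUnesc [c] = [c] := by
  by_cases hc : c = '\\' <;> simp [pvUnesc, hc]

theorem pvUnesc_cons₂ (c d : Char) (rest : List Char) :
    pvUnesc (c :: d :: rest) =
      if c = '\\' then
        (if d = '\'' ∨ d = '\\' then d :: pvUnesc rest else '\\' :: pvUnesc (d :: rest))
      else c :: pvUnesc (d :: rest) := by
  rw [pvUnesc]

theorem pvAGo_eq_aux (n : Nat) : ∀ (inner : List Char) (i : Nat) (out : List Char),
    inner.length - i ≤ n → pvAGo inner i out = out ++ pvUnesc (inner.drop i) := by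
  induction n with
  | zero =>
    intro inner i out hn
    have h : ¬ i < inner.length := by omega
    rw [pvAGo, dif_neg h, List.drop_eq_nil_of_le (by omega), pvUnesc]
    simp
  | succ n ih =>
    intro inner i out hn
    by_cases h : i < inner.length
    · have hdrop : inner.drop i = inner[i] :: inner.drop (i + 1) :=
        List.drop_eq_getElem_cons h
      by_cases h1 : i + 1 < inner.length
      · have hdrop1 : inner.drop (i + 1) = inner[i + 1] :: inner.drop (i + 2) :=
          List.drop_eq_getElem_cons h1
        by_cases hc : inner[i] = '\\'
        · by_cases hnx : inner[i + 1] = '\'' ∨ inner[i + 1] = '\\'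
          · rw [pvAGo]
            simp only [h, dif_pos, hc, h1, and_true, dif_pos, hnx, if_pos]
            rw [ih inner (i + 2) _ (by omega), hdrop, hdrop1, pvUnesc_cons₂,
              if_pos hc, if_pos hnx]
            simp
          · rw [pvAGo]
            simp only [h, dif_pos, hc, h1, and_true, dif_pos, hnx, if_neg, not_false_iff]
            rw [ih inner (i + 1) _ (by omega), hdrop, hdrop1, pvUnesc_cons₂,
              if_pos hc, if_neg hnx, ← hdrop1]
            simp
        · rw [pvAGo]
          simp only [h, dif_pos]
          rw [dif_neg (by simp [hc])]
          rw [ih inner (i + 1) _ (by omega), hdrop, hdrop1, pvUnesc_cons₂, if_neg hc, ← hdrop1]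
          simp
      · -- i is the last index
        have hlast : inner.drop (i + 1) = [] := List.drop_eq_nil_of_le (by omega)
        rw [pvAGo]
        simp only [h, dif_pos]
        rw [dif_neg (by simp [h1])]
        rw [ih inner (i + 1) _ (by omega), hdrop, hlast, pvUnesc_single]
        simp [pvUnesc_nil]
    · rw [pvAGo, dif_neg h, List.drop_eq_nil_of_le (by omega), pvUnesc]
      simp

theorem pvAGo_eq (inner : List Char) (i : Nat) (out : List Char) :
    pvAGo inner i out = out ++ pvUnesc (inner.drop i) :=
  pvAGo_eq_aux (inner.length - i) inner i out le_rfl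

theorem pvBFold_eq (l : List Char) : ∀ (out : List Char) (p : Bool),
    pvBFinish (l.foldl pvBStep (out, p)) =
      out ++ pvUnesc (if p then '\\' :: l else l) := by
  induction l with
  | nil =>
    intro out p
    cases p <;> simp [pvBFinish, pvUnesc]
  | cons c rest ih =>
    intro out p
    cases p with
    | true =>
      by_cases hn : c = '\'' ∨ c = '\\'
      · simp only [List.foldl_cons]
        rw [show pvBStep (out, true) c = (out ++ [c], false) by simp [pvBStep, hn]]
        rw [ih (out ++ [c]) false]
        simp [pvUnesc_cons₂, hn]
      · simp only [List.foldl_cons]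
        rw [show pvBStep (out, true) c = (out ++ ['\\', c], false) by simp [pvBStep, hn]]
        rw [ih (out ++ ['\\', c]) false]
        have hc : ¬ c = '\\' := fun h => hn (Or.inr h)
        have hq : ¬ c = '\'' := fun h => hn (Or.inl h)
        cases rest with
        | nil => simp [pvUnesc_cons₂, pvUnesc_single, pvUnesc_nil, hq, hc]
        | cons d rest' => simp [pvUnesc_cons₂, hq, hc]
    | false =>
      by_cases hc : c = '\\'
      · simp only [List.foldl_cons]
        rw [show pvBStep (out, false) c = (out, true) by simp [pvBStep, hc]]
        rw [ih out true]
        simp [hc]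
      · simp only [List.foldl_cons]
        rw [show pvBStep (out, false) c = (out ++ [c], false) by simp [pvBStep, hc]]
        rw [ih (out ++ [c]) false]
        cases rest with
        | nil => simp [pvUnesc_single, pvUnesc_nil]
        | cons d rest' => simp [pvUnesc_cons₂, hc]

-- ===== VERDICT (by name: the statement is the Claim_ definition above) =====
theorem unescape_sq_py_spec : Claim_equal_unescape_sq_py := by
  intro raw _
  unfold Spec_unescape_sq_py unescape_sq_py unescape_sq_py_alt
  rw [pvAGo_eq, pvBFold_eq]
  simp
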